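-- pv_equiv track=rewrite | github.com/JarolLizama/Unidad_5_y_6 | ADA2 - MetOrdenamiento2/sorting.py | radix_sort_steps
-- ===== SOURCE A (Python) =====
-- def radix_sort_steps(arr):
--     a = arr[:]
--     if not a:
--         return
--     max_val = max(a)
--     exp = 1
--     while max_val // exp > 0:
--         n = len(a)
--         output = [0] * n
--         count  = [0] * 10
--         for i in range(n):
--             idx = (a[i] // exp) % 10
--             count[idx] += 1
--             yield list(a), [i], [], [], f"Dígito exp={exp}: a[{i}]={a[i]}  → cubo {idx}"
--         for i in range(1, 10):
--             count[i] += count[i-1]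
--         for i in range(n-1, -1, -1):
--             idx = (a[i] // exp) % 10
--             output[count[idx]-1] = a[i]
--             count[idx] -= 1
--         for i in range(n):
--             a[i] = output[i]
--         yield list(a), [], [], [], f"Pasada exp={exp} completada"
--         exp *= 10
--     yield list(a), [], [], list(range(len(a))), "¡Ordenado!"
-- ===== SOURCE B (Python) =====
-- def radix_sort_steps(arr):
--     a = list(arr)
--     if not a:
--         return
--     max_val = max(a)
--     exp = 1
--     while max_val // exp > 0:
--         for i, x in enumerate(a):
--             yield list(a), [i], [], [], f"Dígito exp={exp}: a[{i}]={x}  → cubo {(x // exp) % 10}"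
--         a = [x for d in range(10) for x in a if (x // exp) % 10 == d]
--         yield list(a), [], [], [], f"Pasada exp={exp} completada"
--         exp *= 10
--     yield list(a), [], [], list(range(len(a))), "¡Ordenado!"
-- ===== Notes on version B (the rewrite author's own statement) =====
-- stated objective: simpler
-- what changed: Replaces the in-place counting sort (count array, prefix sums, reverse fill into an output array, copy-back) of each radix pass by a stable rebuild that concatenates the ten digit buckets in order, keeping every yielded visualization step identical.
import Mathlib
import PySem

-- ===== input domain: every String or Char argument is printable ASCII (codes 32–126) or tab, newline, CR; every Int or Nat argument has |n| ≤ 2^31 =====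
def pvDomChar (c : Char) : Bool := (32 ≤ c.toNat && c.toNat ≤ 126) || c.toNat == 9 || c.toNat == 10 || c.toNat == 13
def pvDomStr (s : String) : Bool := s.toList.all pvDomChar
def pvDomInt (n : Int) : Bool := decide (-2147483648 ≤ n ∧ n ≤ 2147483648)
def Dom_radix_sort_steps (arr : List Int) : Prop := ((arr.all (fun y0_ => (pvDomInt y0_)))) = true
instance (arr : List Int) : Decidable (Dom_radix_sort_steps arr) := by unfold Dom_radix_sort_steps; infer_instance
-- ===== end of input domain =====

-- B replaces A's in-place counting-sort pass (count array, prefix sums, reverse fill, copy-back)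
-- by a stable rebuild concatenating the ten digit buckets; every yielded step is identical.

-- shared pure helpers: the digit expression (a[i] // exp) % 10 and the two f-strings,
-- identical textual expressions in both Pythons
def pvDigit (exp x : Int) : Int := PySem.Int.mod (PySem.Int.floordiv x exp) 10

def pvMsgDigit (exp i x : Int) : String :=
  "Dígito exp=" ++ PySem.Int.toStr exp ++ ": a[" ++ PySem.Int.toStr i ++ "]=" ++
    PySem.Int.toStr x ++ "  → cubo " ++ PySem.Int.toStr (pvDigit exp x)

def pvMsgPass (exp : Int) : String := "Pasada exp=" ++ PySem.Int.toStr exp ++ " completada"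

-- measure lemma cited by both ports' decreasing_by
theorem pvMeasure_lt (m exp : Int) (hexp : 0 < exp) (h : 0 < PySem.Int.floordiv m exp) :
    (PySem.Int.floordiv m (exp * 10)).toNat < (PySem.Int.floordiv m exp).toNat := by
  rw [PySem.Int.floordiv_eq_ediv_of_pos hexp, PySem.Int.floordiv_eq_ediv_of_pos (by positivity)]
  rw [PySem.Int.floordiv_eq_ediv_of_pos hexp] at h
  rw [← Int.ediv_ediv_of_nonneg (hy := le_of_lt hexp)]
  have hlt : m / exp / 10 < m / exp := by
    rw [Int.ediv_lt_iff_lt_mul (by norm_num)]; omega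
  omega

-- ===== PORT A =====
-- for i in range(n): idx = (a[i]//exp)%10 ; count[idx] += 1 ; yield step
def pvCountLoopA (a : List Int) (exp : Int) :
    List Int × List (List Int × List Int × List Int × List Int × String) :=
  (PySem.List.pyRange 0 (a.length : Int) 1).foldl
    (fun s i =>
      (PySem.List.pySetD s.1 (pvDigit exp (PySem.List.pyGetD a i 0))
          (PySem.List.pyGetD s.1 (pvDigit exp (PySem.List.pyGetD a i 0)) 0 + 1),
       s.2 ++ [(a, [i], [], [], pvMsgDigit exp i (PySem.List.pyGetD a i 0))]))
    (List.replicate 10 0, [])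

-- for i in range(1, 10): count[i] += count[i-1]
def pvPrefixA (c : List Int) : List Int :=
  (PySem.List.pyRange 1 10 1).foldl
    (fun c i => PySem.List.pySetD c i (PySem.List.pyGetD c i 0 + PySem.List.pyGetD c (i - 1) 0)) c

-- for i in range(n-1, -1, -1): idx = ... ; output[count[idx]-1] = a[i] ; count[idx] -= 1
def pvFillA (a : List Int) (exp : Int) (s0 : List Int × List Int) : List Int × List Int :=
  (PySem.List.pyRange ((a.length : Int) - 1) (-1) (-1)).foldl
    (fun s i =>
      (PySem.List.pySetD s.1
          (PySem.List.pyGetD s.2 (pvDigit exp (PySem.List.pyGetD a i 0)) 0 - 1)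
          (PySem.List.pyGetD a i 0),
       PySem.List.pySetD s.2 (pvDigit exp (PySem.List.pyGetD a i 0))
          (PySem.List.pyGetD s.2 (pvDigit exp (PySem.List.pyGetD a i 0)) 0 - 1)))
    s0

-- for i in range(n): a[i] = output[i]
def pvCopyA (a output : List Int) : List Int :=
  (PySem.List.pyRange 0 (a.length : Int) 1).foldl
    (fun acc i => PySem.List.pySetD acc i (PySem.List.pyGetD output i 0)) a

-- while max_val // exp > 0: ... ; returns (yielded steps, final a)
def pvLoopA (m : Int) (a : List Int) (exp : Int) (hexp : 0 < exp) :
    List (List Int × List Int × List Int × List Int × String) × List Int :=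
  if h : 0 < PySem.Int.floordiv m exp then
    let cs := pvCountLoopA a exp
    let count := pvPrefixA cs.1
    let fo := pvFillA a exp (List.replicate a.length 0, count)
    let a' := pvCopyA a fo.1
    let rest := pvLoopA m a' (exp * 10) (by positivity)
    (cs.2 ++ (a', [], [], [], pvMsgPass exp) :: rest.1, rest.2)
  else ([], a)
termination_by (PySem.Int.floordiv m exp).toNat
decreasing_by exact pvMeasure_lt m exp hexp h

def radix_sort_steps (arr : List Int) :
    List (List Int × List Int × List Int × List Int × String) :=
  if arr.isEmpty then []
  else
    match PySem.List.max? arr (fun x => x) with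
    | none => []
    | some m =>
      let r := pvLoopA m arr 1 one_pos
      r.1 ++ [(r.2, [], [], PySem.List.pyRange 0 (r.2.length : Int) 1, "¡Ordenado!")]

-- ===== PORT B =====
-- for i, x in enumerate(a): yield step
def pvStepsB (a : List Int) (exp : Int) :
    List (List Int × List Int × List Int × List Int × String) :=
  (PySem.List.enumerate a 0).map (fun p => (a, [p.1], [], [], pvMsgDigit exp p.1 p.2))

-- a = [x for d in range(10) for x in a if (x // exp) % 10 == d]
def pvRebuildB (a : List Int) (exp : Int) : List Int :=
  (PySem.List.pyRange 0 10 1).flatMap (fun d => a.filter (fun x => pvDigit exp x == d))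

def pvLoopB (m : Int) (a : List Int) (exp : Int) (hexp : 0 < exp) :
    List (List Int × List Int × List Int × List Int × String) × List Int :=
  if h : 0 < PySem.Int.floordiv m exp then
    let a' := pvRebuildB a exp
    let rest := pvLoopB m a' (exp * 10) (by positivity)
    (pvStepsB a exp ++ (a', [], [], [], pvMsgPass exp) :: rest.1, rest.2)
  else ([], a)
termination_by (PySem.Int.floordiv m exp).toNat
decreasing_by exact pvMeasure_lt m exp hexp h

def radix_sort_steps_alt (arr : List Int) :
    List (List Int × List Int × List Int × List Int × String) :=
  if arr.isEmpty then []
  else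
    match PySem.List.max? arr (fun x => x) with
    | none => []
    | some m =>
      let r := pvLoopB m arr 1 one_pos
      r.1 ++ [(r.2, [], [], PySem.List.pyRange 0 (r.2.length : Int) 1, "¡Ordenado!")]

-- ===== PRECONDITION & SPEC =====
def Spec_radix_sort_steps (arr : List Int) (out : List (List Int × List Int × List Int × List Int × String)) : Prop := out = radix_sort_steps_alt arr
instance (arr : List Int) (out : List (List Int × List Int × List Int × List Int × String)) : Decidable (Spec_radix_sort_steps arr out) := by unfold Spec_radix_sort_steps; infer_instance

-- ===== CLAIM (what is proved, stated in full; the proofs are below) =====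
def Claim_equal_radix_sort_steps : Prop := ∀ (arr : List Int), Dom_radix_sort_steps arr → Spec_radix_sort_steps arr (radix_sort_steps arr)

-- ===== LEMMAS AND PROOFS =====

-- digit counts and their partial sums
def pvCnt (exp : Int) (l : List Int) (d : Nat) : Nat :=
  l.countP (fun x => pvDigit exp x == (d : Int))

def pvS (exp : Int) (a : List Int) (d : Nat) : Nat :=
  ((List.range d).map (pvCnt exp a)).sum

theorem pvDigit_bounds (exp x : Int) (_hexp : 0 < exp) :
    0 ≤ pvDigit exp x ∧ pvDigit exp x < 10 :=
  ⟨PySem.Int.mod_nonneg _ (by norm_num), PySem.Int.mod_lt _ (by norm_num)⟩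

theorem pass_steps_eq (a : List Int) (exp : Int) :
    (pvCountLoopA a exp).2 = pvStepsB a exp := by
  unfold pvCountLoopA pvStepsB
  rw [PySem.List.foldl_prod_mk
        (f := fun c i => PySem.List.pySetD c (pvDigit exp (PySem.List.pyGetD a i 0))
          (PySem.List.pyGetD c (pvDigit exp (PySem.List.pyGetD a i 0)) 0 + 1))
        (g := fun st i => st ++ [(a, [i], [], [], pvMsgDigit exp i (PySem.List.pyGetD a i 0))])]
  rw [PySem.List.enumerate_eq_map_pyRange (d := 0)]
  simp only [PySem.List.foldl_append_singleton_eq_map, List.map_map, Function.comp_def,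
    List.nil_append]
  rfl

def pvCntStep (exp : Int) (c : List Int) (x : Int) : List Int :=
  PySem.List.pySetD c (pvDigit exp x) (PySem.List.pyGetD c (pvDigit exp x) 0 + 1)

theorem count_fold (exp : Int) (hexp : 0 < exp) (l : List Int) :
    ∀ c : List Int, c.length = 10 →
      (l.foldl (pvCntStep exp) c).length = 10 ∧
      ∀ d : Nat, d < 10 →
        PySem.List.pyGetD (l.foldl (pvCntStep exp) c) (d : Int) 0
          = PySem.List.pyGetD c (d : Int) 0 + (pvCnt exp l d : Int) := by
  induction l with
  | nil => intro c hc; simp [pvCnt, hc]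
  | cons x t ih =>
    intro c hc
    have hb := pvDigit_bounds exp x hexp
    have hx : pvDigit exp x = ((pvDigit exp x).toNat : Int) := (Int.toNat_of_nonneg hb.1).symm
    have hlen : (pvCntStep exp c x).length = 10 := by
      rw [pvCntStep, PySem.List.pySetD_of_nonneg _ _ hb.1]
      simp [hc]
    obtain ⟨ihl, ihv⟩ := ih (pvCntStep exp c x) hlen
    refine ⟨by simpa using ihl, ?_⟩
    intro d hd
    rw [List.foldl_cons, ihv d hd]
    have hstep : PySem.List.pyGetD (pvCntStep exp c x) (d:Int) 0
        = PySem.List.pyGetD c (d:Int) 0 + (if pvDigit exp x == (d:Int) then 1 else 0) := by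
      rw [pvCntStep, hx, PySem.List.pyGetD_pySetD_natCast c (pvDigit exp x).toNat d _ _ (by omega)]
      by_cases hde : d = (pvDigit exp x).toNat
      · simp [hde]
      · have hne : (((pvDigit exp x).toNat : Int) == (d:Int)) = false := by
          simp only [beq_eq_false_iff_ne, ne_eq, Int.natCast_inj]; omega
        rw [if_neg hde, hne]
        simp
    rw [hstep]
    simp only [pvCnt, List.countP_cons]
    by_cases hpx : (pvDigit exp x == (d:Int)) = true
    · simp [hpx]
      ring
    · simp [hpx]

theorem countA_fst (a : List Int) (exp : Int) (hexp : 0 < exp) :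
    (pvCountLoopA a exp).1.length = 10 ∧
    ∀ d : Nat, d < 10 →
      PySem.List.pyGetD (pvCountLoopA a exp).1 (d : Int) 0 = (pvCnt exp a d : Int) := by
  unfold pvCountLoopA
  rw [PySem.List.foldl_prod_mk
        (f := fun c i => PySem.List.pySetD c (pvDigit exp (PySem.List.pyGetD a i 0))
          (PySem.List.pyGetD c (pvDigit exp (PySem.List.pyGetD a i 0)) 0 + 1))
        (g := fun st i => st ++ [(a, [i], [], [], pvMsgDigit exp i (PySem.List.pyGetD a i 0))])]
  have hconv : List.foldl (fun c i => PySem.List.pySetD c (pvDigit exp (PySem.List.pyGetD a i 0))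
          (PySem.List.pyGetD c (pvDigit exp (PySem.List.pyGetD a i 0)) 0 + 1))
        (List.replicate 10 0) (PySem.List.pyRange 0 (a.length : Int) 1)
      = List.foldl (pvCntStep exp) (List.replicate 10 0) a := by
    have := PySem.List.foldl_pyRange_pyGetD a 0 (pvCntStep exp)
      (List.replicate 10 0) (a := 0) le_rfl
    simpa [pvCntStep, PySem.List.len] using this
  obtain ⟨h1, h2⟩ := count_fold exp hexp a (List.replicate 10 0) (by simp)
  dsimp only
  refine ⟨by rw [hconv]; exact h1, ?_⟩
  intro d hd
  have hz : PySem.List.pyGetD (List.replicate 10 (0:Int)) (d : Int) 0 = 0 := by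
    rw [PySem.List.pyGetD_natCast]
    interval_cases d <;> rfl
  rw [hconv, h2 d hd, hz, zero_add]

theorem prefix_go (c : List Int) (hc : c.length = 10) :
    ∀ j : Nat, 1 ≤ j → j ≤ 10 →
      ((PySem.List.pyRange 1 (j:Int) 1).foldl
          (fun c i => PySem.List.pySetD c i
            (PySem.List.pyGetD c i 0 + PySem.List.pyGetD c (i - 1) 0)) c).length = 10 ∧
      ∀ d : Nat, d < 10 →
        PySem.List.pyGetD ((PySem.List.pyRange 1 (j:Int) 1).foldl
            (fun c i => PySem.List.pySetD c i
              (PySem.List.pyGetD c i 0 + PySem.List.pyGetD c (i - 1) 0)) c) (d:Int) 0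
          = if d < j then ((List.range (d+1)).map (fun e : Nat => PySem.List.pyGetD c ((e:Nat):Int) 0)).sum
            else PySem.List.pyGetD c (d:Int) 0 := by
  intro j
  induction j with
  | zero => omega
  | succ j ihj =>
    intro _ hj10
    by_cases hj1 : 1 ≤ j
    · obtain ⟨ihl, ihv⟩ := ihj hj1 (by omega)
      have hsplit : PySem.List.pyRange 1 ((j+1 : Nat) : Int) 1
          = PySem.List.pyRange 1 (j:Int) 1 ++ [(j:Int)] := by
        push_cast
        exact PySem.List.pyRange_one_succ_right (by exact_mod_cast hj1)
      rw [hsplit, List.foldl_append]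
      set prev := (PySem.List.pyRange 1 (j:Int) 1).foldl
          (fun c i => PySem.List.pySetD c i
            (PySem.List.pyGetD c i 0 + PySem.List.pyGetD c (i - 1) 0)) c with hprev
      simp only [List.foldl_cons, List.foldl_nil]
      have hjlt : j < 10 := by omega
      have hvj : PySem.List.pyGetD prev (j:Int) 0 = PySem.List.pyGetD c (j:Int) 0 := by
        rw [ihv j hjlt, if_neg (by omega)]
      have hcast : (j:Int) - 1 = ((j - 1 : Nat) : Int) := by
        rw [Nat.cast_sub hj1, Nat.cast_one]
      have hvj1 : PySem.List.pyGetD prev ((j:Int) - 1) 0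
          = ((List.range j).map (fun e : Nat => PySem.List.pyGetD c ((e:Nat):Int) 0)).sum := by
        rw [hcast, ihv (j-1) (by omega), if_pos (by omega)]
        have hjj : j - 1 + 1 = j := by omega
        rw [hjj]
      constructor
      · rw [PySem.List.pySetD_of_nonneg _ _ (by positivity)]
        simp [ihl]
      · intro d hd
        rw [PySem.List.pyGetD_pySetD_natCast prev j d _ _ (by omega)]
        by_cases hdj : d = j
        · rw [if_pos hdj, if_pos (by omega), hdj, hvj, hvj1, List.range_succ]
          simp [add_comm]
        · rw [if_neg hdj, ihv d hd]
          by_cases hdlt : d < j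
          · rw [if_pos hdlt, if_pos (by omega)]
          · rw [if_neg hdlt, if_neg (by omega)]
    · have hj0 : j = 0 := by omega
      subst hj0
      have hnil : PySem.List.pyRange 1 ((1:Nat):Int) 1 = [] :=
        PySem.List.pyRange_one_eq_nil (by norm_num)
      rw [hnil]
      refine ⟨hc, ?_⟩
      intro d hd
      simp only [List.foldl_nil]
      by_cases hd0 : d < 1
      · have : d = 0 := by omega
        subst this
        rw [if_pos hd0]
        simp [PySem.List.pyGetD_zero, List.getD]
      · rw [if_neg hd0]

theorem prefix_spec (c : List Int) (hc : c.length = 10) :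
    (pvPrefixA c).length = 10 ∧
    ∀ d : Nat, d < 10 →
      PySem.List.pyGetD (pvPrefixA c) (d:Int) 0
        = ((List.range (d+1)).map (fun e : Nat => PySem.List.pyGetD c ((e:Nat):Int) 0)).sum := by
  have h := prefix_go c hc 10 (by norm_num) le_rfl
  have h10 : ((10:Nat) : Int) = (10:Int) := by norm_num
  rw [h10] at h
  obtain ⟨h1, h2⟩ := h
  refine ⟨h1, ?_⟩
  intro d hd
  have := h2 d hd
  rw [if_pos hd] at this
  exact this

def pvFillStep (exp : Int) (s : List Int × List Int) (x : Int) : List Int × List Int :=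
  (PySem.List.pySetD s.1 (PySem.List.pyGetD s.2 (pvDigit exp x) 0 - 1) x,
   PySem.List.pySetD s.2 (pvDigit exp x) (PySem.List.pyGetD s.2 (pvDigit exp x) 0 - 1))

theorem pvCnt_cons_self (exp x : Int) (t : List Int) (hexp : 0 < exp) :
    pvCnt exp (x :: t) (pvDigit exp x).toNat = pvCnt exp t (pvDigit exp x).toNat + 1 := by
  have hb := pvDigit_bounds exp x hexp
  simp [pvCnt, List.countP_cons, Int.toNat_of_nonneg hb.1]

theorem pvCnt_cons_ne (exp x : Int) (t : List Int) (hexp : 0 < exp) (d : Nat)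
    (hd : d ≠ (pvDigit exp x).toNat) :
    pvCnt exp (x :: t) d = pvCnt exp t d := by
  have hb := pvDigit_bounds exp x hexp
  have : (pvDigit exp x == (d:Int)) = false := by
    simp only [beq_eq_false_iff_ne, ne_eq]
    intro hcontra
    apply hd
    omega
  simp [pvCnt, List.countP_cons, this]

theorem foldl_range_getD {β : Type} (f : β → Int → β) :
    ∀ (l : List Int) (init : β),
      (List.range l.length).foldl (fun s k => f s (l.getD k 0)) init = l.foldl f init := by
  intro l
  induction l with
  | nil => intro init; rfl
  | cons x t ih =>
    intro init
    rw [List.length_cons, List.range_succ_eq_map, List.foldl_cons, List.foldl_map]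
    simp only [List.getD_cons_zero, List.getD_cons_succ]
    exact ih (f init x)

theorem fillA_eq (a : List Int) (exp : Int) (s0 : List Int × List Int) :
    pvFillA a exp s0 = a.reverse.foldl (pvFillStep exp) s0 := by
  unfold pvFillA
  rw [PySem.List.pyRange_neg_one, List.foldl_map]
  have hn : (((a.length : Int) - 1) - (-1)).toNat = a.reverse.length := by
    simp
  rw [hn]
  rw [PySem.List.foldl_congr_mem _ _
      (fun s k => pvFillStep exp s (a.reverse.getD k 0)) s0 ?_]
  · exact foldl_range_getD (pvFillStep exp) a.reverse s0
  · intro acc k hk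
    have hk' : k < a.length := by
      simpa using List.mem_range.mp hk
    have hidx : (0:Int) ≤ (a.length : Int) - 1 - (k : Int) := by omega
    have hidx2 : ((a.length : Int) - 1 - (k : Int)) < (a.length : Int) := by omega
    have hget : PySem.List.pyGetD a ((a.length : Int) - 1 - (k : Int)) 0
        = a.reverse.getD k 0 := by
      have hidx3 : ((a.length : Int) - 1 - (k : Int)).toNat = a.length - 1 - k := by omega
      rw [PySem.List.pyGetD_eq_getElem a 0 hidx hidx2,
        List.getD_eq_getElem a.reverse 0 (by simpa using hk'), List.getElem_reverse]
      simp only [hidx3]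
    show pvFillStep exp acc (PySem.List.pyGetD a ((a.length : Int) - 1 - (k:Int)) 0)
        = pvFillStep exp acc (a.reverse.getD k 0)
    rw [hget]

theorem fill_go (exp : Int) (hexp : 0 < exp) :
    ∀ (r out c : List Int) (start : Nat → Nat),
      c.length = 10 →
      (∀ d : Nat, d < 10 →
        PySem.List.pyGetD c (d:Int) 0 = (start d : Int) + (pvCnt exp r d : Int)) →
      (∀ d : Nat, d < 10 → start d + pvCnt exp r d ≤ out.length) →
      (∀ d1 d2 : Nat, d1 < 10 → d2 < 10 → d1 ≠ d2 →
        ∀ i : Nat, start d1 ≤ i → i < start d1 + pvCnt exp r d1 →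
          ¬(start d2 ≤ i ∧ i < start d2 + pvCnt exp r d2)) →
      (r.foldl (pvFillStep exp) (out, c)).1.length = out.length ∧
      (r.foldl (pvFillStep exp) (out, c)).2.length = 10 ∧
      (∀ d : Nat, d < 10 →
        PySem.List.pyGetD (r.foldl (pvFillStep exp) (out, c)).2 (d:Int) 0 = (start d : Int)) ∧
      (∀ d : Nat, d < 10 → ∀ j : Nat, j < pvCnt exp r d →
        (r.foldl (pvFillStep exp) (out, c)).1[start d + j]?
          = (r.reverse.filter (fun x => pvDigit exp x == (d:Int)))[j]?) ∧
      (∀ i : Nat, (∀ d : Nat, d < 10 → ¬(start d ≤ i ∧ i < start d + pvCnt exp r d)) →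
        (r.foldl (pvFillStep exp) (out, c)).1[i]? = out[i]?) := by
  intro r
  induction r with
  | nil =>
    intro out c start hc hcv _ _
    refine ⟨rfl, hc, ?_, ?_, fun _ _ => rfl⟩
    · intro d hd
      have := hcv d hd
      simp [pvCnt] at this
      simpa using this
    · intro d _ j hj
      simp [pvCnt] at hj
  | cons x t ih =>
    intro out c start hc hcv hbound hdisj
    have hb := pvDigit_bounds exp x hexp
    set d0 : Nat := (pvDigit exp x).toNat with hd0def
    have hd0c : ((d0 : Nat) : Int) = pvDigit exp x := Int.toNat_of_nonneg hb.1
    have hd0lt : d0 < 10 := by omega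
    have hcx : pvCnt exp (x :: t) d0 = pvCnt exp t d0 + 1 := pvCnt_cons_self exp x t hexp
    have hcne : ∀ d : Nat, d ≠ d0 → pvCnt exp (x :: t) d = pvCnt exp t d :=
      fun d hd => pvCnt_cons_ne exp x t hexp d hd
    -- the write position
    set posN : Nat := start d0 + pvCnt exp t d0 with hposdef
    have hposval : PySem.List.pyGetD c (pvDigit exp x) 0 - 1 = (posN : Int) := by
      rw [← hd0c, hcv d0 hd0lt, hcx]
      push_cast
      omega
    have hposlt : posN < out.length := by
      have := hbound d0 hd0lt
      omega
    -- the state after processing x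
    have hstate : pvFillStep exp (out, c) x = (out.set posN x, c.set d0 (posN : Int)) := by
      rw [pvFillStep]
      simp only
      rw [hposval, ← hd0c]
      rw [PySem.List.pySetD_of_nonneg _ _ (by positivity),
        PySem.List.pySetD_of_nonneg _ _ (by positivity)]
      simp [hposval, ← hd0c]
    have hc1get : ∀ d : Nat, d < 10 →
        PySem.List.pyGetD (c.set d0 ((posN : Nat) : Int)) (d:Int) 0
          = if d = d0 then (posN : Int) else PySem.List.pyGetD c (d:Int) 0 := by
      intro d hd
      have := PySem.List.pyGetD_pySetD_natCast c d0 d ((posN : Nat) : Int) 0 (by omega)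
      rw [PySem.List.pySetD_of_nonneg _ _ (by positivity)] at this
      simpa using this
    obtain ⟨L1, L2, V, Fill, Un⟩ := ih (out.set posN x) (c.set d0 (posN : Int)) start
      (by simp [hc])
      (by
        intro d hd
        rw [hc1get d hd]
        by_cases hdd : d = d0
        · rw [if_pos hdd, hdd]
          push_cast
          omega
        · rw [if_neg hdd, hcv d hd, hcne d hdd])
      (by
        intro d hd
        have h1 := hbound d hd
        have h2 : pvCnt exp t d ≤ pvCnt exp (x :: t) d := by
          by_cases hdd : d = d0
          · rw [hdd, hcx]; omega
          · rw [hcne d hdd]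
        simp only [List.length_set]
        omega)
      (by
        intro d1 d2 h1 h2 hne i hi1 hi2
        have hsub : ∀ d : Nat, pvCnt exp t d ≤ pvCnt exp (x :: t) d := by
          intro d
          by_cases hdd : d = d0
          · rw [hdd, hcx]; omega
          · rw [hcne d hdd]
        have := hdisj d1 d2 h1 h2 hne i hi1 (by have := hsub d1; omega)
        have h2s := hsub d2
        intro hcon
        exact this ⟨hcon.1, by omega⟩)
    rw [List.foldl_cons, hstate]
    have hsub : ∀ d : Nat, pvCnt exp t d ≤ pvCnt exp (x :: t) d := by
      intro d
      by_cases hdd : d = d0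
      · rw [hdd, hcx]; omega
      · rw [hcne d hdd]
    have hfiltlen : ∀ d : Nat,
        ((t.reverse.filter (fun y => pvDigit exp y == (d:Int))).length) = pvCnt exp t d := by
      intro d
      rw [← List.countP_eq_length_filter, List.countP_reverse]
      rfl
    have hrevfilt : ∀ d : Nat, ((x :: t).reverse.filter (fun y => pvDigit exp y == (d:Int)))
        = t.reverse.filter (fun y => pvDigit exp y == (d:Int))
          ++ (if d = d0 then [x] else []) := by
      intro d
      rw [List.reverse_cons, List.filter_append]
      congr 1
      by_cases hdd : d = d0
      · have : (pvDigit exp x == ((d:Nat) : Int)) = true := by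
          simp only [beq_iff_eq]
          omega
        simp [this, hdd]
        omega
      · have : (pvDigit exp x == ((d:Nat) : Int)) = false := by
          simp only [beq_eq_false_iff_ne, ne_eq]
          intro hcontra
          apply hdd
          omega
        simp [List.filter, this, hdd]
    refine ⟨by rw [L1]; simp, L2, V, ?_, ?_⟩
    · -- fill clause
      intro d hd j hj
      rw [hrevfilt d]
      by_cases hdd : d = d0
      · subst hdd
        rw [hcx] at hj
        by_cases hjlast : j < pvCnt exp t d0
        · rw [Fill d0 hd0lt j hjlast, List.getElem?_append_left (by rw [hfiltlen d0]; omega)]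
        · have hjeq : j = pvCnt exp t d0 := by omega
          subst hjeq
          have hi : start d0 + pvCnt exp t d0 = posN := rfl
          rw [hi]
          have huni : ∀ d2 : Nat, d2 < 10 →
              ¬(start d2 ≤ posN ∧ posN < start d2 + pvCnt exp t d2) := by
            intro d2 hd2
            by_cases hdd2 : d2 = d0
            · subst hdd2
              omega
            · intro hcon
              exact hdisj d0 d2 hd0lt hd2 (fun hh => hdd2 hh.symm) posN (by omega)
                (by rw [hcx]; omega) ⟨hcon.1, by have := hsub d2; omega⟩
          rw [Un posN huni, List.getElem?_set_self hposlt]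
          rw [← hfiltlen d0, if_pos rfl, List.getElem?_concat_length]
      · rw [hcne d hdd] at hj
        rw [Fill d hd j hj]
        simp only [if_neg hdd, List.append_nil]
    · -- untouched clause
      intro i hout
      have hout' : ∀ d : Nat, d < 10 → ¬(start d ≤ i ∧ i < start d + pvCnt exp t d) := by
        intro d hd hcon
        exact hout d hd ⟨hcon.1, by have := hsub d; omega⟩
      rw [Un i hout']
      have hipos : i ≠ posN := by
        intro hcontra
        subst hcontra
        exact hout d0 hd0lt ⟨by omega, by rw [hcx]; omega⟩
      rw [List.getElem?_set_ne (fun hh => hipos hh.symm)]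

theorem pvS_succ (exp : Int) (a : List Int) (d : Nat) :
    pvS exp a (d + 1) = pvS exp a d + pvCnt exp a d := by
  simp [pvS, List.range_succ]

theorem pvS_mono (exp : Int) (a : List Int) : ∀ (d j : Nat), pvS exp a d ≤ pvS exp a (d + j) := by
  intro d j
  induction j with
  | zero => exact le_rfl
  | succ j ih =>
    have h1 := pvS_succ exp a (d + j)
    show pvS exp a d ≤ pvS exp a ((d + j) + 1)
    omega

theorem sum_ite_digit (exp x : Int) (hexp : 0 < exp) :
    ((List.range 10).map (fun d => if pvDigit exp x == ((d : Nat) : Int) then (1:Nat) else 0)).sum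
      = 1 := by
  obtain ⟨h0, h1⟩ := pvDigit_bounds exp x hexp
  set v := pvDigit exp x with hv
  interval_cases v <;> decide

theorem pvS_ten (exp : Int) (hexp : 0 < exp) (a : List Int) : pvS exp a 10 = a.length := by
  induction a with
  | nil =>
    have hz : pvCnt exp ([] : List Int) = fun _ => 0 := funext fun _ => rfl
    simp [pvS, hz]
  | cons x t ih =>
    have hsum : pvS exp (x :: t) 10
        = pvS exp t 10
          + ((List.range 10).map
              (fun d => if pvDigit exp x == ((d : Nat) : Int) then (1:Nat) else 0)).sum := by
      simp only [pvS, pvCnt, List.countP_cons]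
      rw [← List.sum_map_add]
      congr 1
      apply List.map_congr_left
      intro i _
      simp [pvCnt, List.countP_cons]
    rw [hsum, sum_ite_digit exp x hexp, ih]
    simp

theorem copy_fold (out : List Int) :
    ∀ (n : Nat) (acc : List Int),
      ((List.range n).foldl (fun acc k => acc.set k (out.getD k 0)) acc).length = acc.length ∧
      ∀ i : Nat, ((List.range n).foldl (fun acc k => acc.set k (out.getD k 0)) acc)[i]?
        = if i < n ∧ i < acc.length then some (out.getD i 0) else acc[i]? := by
  intro n
  induction n with
  | zero =>
    intro acc
    refine ⟨rfl, ?_⟩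
    intro i
    rw [if_neg (by omega)]
    rfl
  | succ n ih =>
    intro acc
    obtain ⟨ihl, ihv⟩ := ih acc
    rw [List.range_succ, List.foldl_append, List.foldl_cons, List.foldl_nil]
    constructor
    · rw [List.length_set, ihl]
    · intro i
      rw [List.getElem?_set, ihl, ihv i]
      by_cases hin : i = n
      · subst hin
        by_cases hlt : i < acc.length
        · rw [if_pos rfl, if_pos hlt, if_pos ⟨by omega, hlt⟩]
        · rw [if_pos rfl, if_neg hlt, if_neg (by omega)]
          exact (List.getElem?_eq_none_iff.mpr (by omega)).symm
      · rw [if_neg (fun hh => hin hh.symm)]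
        by_cases h1 : i < n ∧ i < acc.length
        · rw [if_pos h1, if_pos ⟨by omega, h1.2⟩]
        · rw [if_neg h1, if_neg (by omega)]

theorem copy_eq (a out : List Int) (h : out.length = a.length) : pvCopyA a out = out := by
  unfold pvCopyA
  rw [PySem.List.pyRange_zero_natCast, List.foldl_map]
  simp only [PySem.List.pySetD_natCast, PySem.List.pyGetD_natCast]
  obtain ⟨hl, hv⟩ := copy_fold out a.length a
  apply List.ext_getElem?
  intro i
  rw [hv i]
  by_cases hi : i < a.length
  · rw [if_pos ⟨hi, hi⟩, List.getD_eq_getElem out 0 (by omega)]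
    rw [List.getElem?_eq_getElem (by omega)]
  · rw [if_neg (by omega)]
    rw [List.getElem?_eq_none_iff.mpr (by omega), List.getElem?_eq_none_iff.mpr (by omega)]

theorem segments (exp : Int) (a out' : List Int)
    (hlen : out'.length = pvS exp a 10)
    (hfill : ∀ d : Nat, d < 10 → ∀ j : Nat, j < pvCnt exp a d →
      out'[pvS exp a d + j]? = (a.filter (fun x => pvDigit exp x == (d:Int)))[j]?) :
    out' = (List.range 10).flatMap (fun d : Nat => a.filter (fun x => pvDigit exp x == ((d:Nat):Int))) := by
  have key : ∀ m : Nat, m ≤ 10 →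
      out'.drop (pvS exp a (10 - m))
        = ((List.range 10).drop (10 - m)).flatMap
            (fun d : Nat => a.filter (fun x => pvDigit exp x == ((d:Nat):Int))) := by
    intro m
    induction m with
    | zero =>
      intro _
      simp only [Nat.sub_zero]
      rw [List.drop_eq_nil_of_le (by omega), List.drop_eq_nil_of_le (by simp)]
      rfl
    | succ m ih =>
      intro hm
      have ihh := ih (by omega)
      set k : Nat := 10 - (m + 1) with hk
      have hk10 : k < 10 := by omega
      have hkk : 10 - m = k + 1 := by omega
      rw [hkk] at ihh
      have hdropr : (List.range 10).drop k = k :: (List.range 10).drop (k + 1) := by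
        rw [List.drop_eq_getElem_cons (by simp [hk10])]
        simp
      rw [hdropr, List.flatMap_cons]
      have hbound : pvS exp a k + pvCnt exp a k ≤ out'.length := by
        rw [hlen, ← pvS_succ]
        have := pvS_mono exp a (k+1) (10 - (k+1))
        have h10 : k + 1 + (10 - (k+1)) = 10 := by omega
        rw [h10] at this
        exact this
      have htake : (out'.drop (pvS exp a k)).take (pvCnt exp a k)
          = a.filter (fun x => pvDigit exp x == (k:Int)) := by
        apply List.ext_getElem?
        intro j
        rw [List.getElem?_take]
        by_cases hj : j < pvCnt exp a k
        · rw [if_pos hj, List.getElem?_drop, hfill k hk10 j hj]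
        · rw [if_neg hj, eq_comm, List.getElem?_eq_none_iff]
          rw [← List.countP_eq_length_filter]
          have : List.countP (fun x => pvDigit exp x == (k:Int)) a = pvCnt exp a k := rfl
          omega
      calc out'.drop (pvS exp a k)
          = (out'.drop (pvS exp a k)).take (pvCnt exp a k)
            ++ (out'.drop (pvS exp a k)).drop (pvCnt exp a k) := (List.take_append_drop _ _).symm
        _ = a.filter (fun x => pvDigit exp x == (k:Int)) ++ out'.drop (pvS exp a (k+1)) := by
            rw [htake, List.drop_drop, ← pvS_succ]
        _ = a.filter (fun x => pvDigit exp x == (k:Int))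
            ++ ((List.range 10).drop (k+1)).flatMap
                (fun d : Nat => a.filter (fun x => pvDigit exp x == ((d:Nat):Int))) := by rw [ihh]
  have h0 := key 10 le_rfl
  simpa using h0

theorem pass_array_eq (a : List Int) (exp : Int) (hexp : 0 < exp) :
    pvCopyA a (pvFillA a exp (List.replicate a.length 0,
        pvPrefixA (pvCountLoopA a exp).1)).1 = pvRebuildB a exp := by
  obtain ⟨hcl, hcv⟩ := countA_fst a exp hexp
  obtain ⟨hpl, hpv⟩ := prefix_spec (pvCountLoopA a exp).1 hcl
  have hrev : ∀ d : Nat, pvCnt exp a.reverse d = pvCnt exp a d := by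
    intro d
    simp [pvCnt, List.countP_reverse]
  have hmono' : ∀ {p q : Nat}, p ≤ q → pvS exp a p ≤ pvS exp a q := by
    intro p q hpq
    have := pvS_mono exp a p (q - p)
    rwa [show p + (q - p) = q from by omega] at this
  have hprefix : ∀ d : Nat, d < 10 →
      PySem.List.pyGetD (pvPrefixA (pvCountLoopA a exp).1) (d:Int) 0
        = ((pvS exp a d : Nat) : Int) + ((pvCnt exp a.reverse d : Nat) : Int) := by
    intro d hd
    rw [hpv d hd]
    rw [List.map_congr_left (fun e he => hcv e (by
      have := List.mem_range.mp he
      omega))]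
    rw [hrev d]
    have hcast : ((List.range (d+1)).map (fun e => ((pvCnt exp a e : Nat) : Int))).sum
        = ((pvS exp a (d+1) : Nat) : Int) := by
      rw [pvS, Nat.cast_list_sum, List.map_map]
      rfl
    rw [hcast, pvS_succ]
    push_cast
    ring
  obtain ⟨F1, F2, F3, F4, F5⟩ := fill_go exp hexp a.reverse
    (List.replicate a.length 0) (pvPrefixA (pvCountLoopA a exp).1) (pvS exp a)
    hpl hprefix
    (by
      intro d hd
      rw [hrev d]
      simp only [List.length_replicate]
      have h1 : pvS exp a d + pvCnt exp a d = pvS exp a (d + 1) := (pvS_succ exp a d).symm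
      have h2 : pvS exp a (d + 1) ≤ pvS exp a 10 := hmono' (by omega)
      rw [pvS_ten exp hexp a] at h2
      omega)
    (by
      intro d1 d2 h1 h2 hne i hi1 hi2
      rw [hrev d1] at hi2
      rw [hrev d2]
      rcases Nat.lt_or_ge d1 d2 with hlt | hge
      · have ha1 : pvS exp a d1 + pvCnt exp a d1 = pvS exp a (d1 + 1) := (pvS_succ exp a d1).symm
        have ha2 : pvS exp a (d1 + 1) ≤ pvS exp a d2 := hmono' (by omega)
        intro hcon
        omega
      · have hgt : d2 < d1 := by omega
        have ha1 : pvS exp a d2 + pvCnt exp a d2 = pvS exp a (d2 + 1) := (pvS_succ exp a d2).symm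
        have ha2 : pvS exp a (d2 + 1) ≤ pvS exp a d1 := hmono' (by omega)
        intro hcon
        omega)
  rw [fillA_eq]
  have hflen : (a.reverse.foldl (pvFillStep exp)
      (List.replicate a.length 0, pvPrefixA (pvCountLoopA a exp).1)).1.length = a.length := by
    rw [F1]
    simp
  rw [copy_eq a _ (by rw [hflen])]
  have hseg := segments exp a
    (a.reverse.foldl (pvFillStep exp)
      (List.replicate a.length 0, pvPrefixA (pvCountLoopA a exp).1)).1
    (by rw [hflen, pvS_ten exp hexp a])
    (by
      intro d hd j hj
      have hj' : j < pvCnt exp a.reverse d := by rw [hrev d]; exact hj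
      have := F4 d hd j hj'
      rwa [List.reverse_reverse] at this)
  rw [hseg]
  unfold pvRebuildB
  rw [show (10:Int) = ((10:Nat):Int) from by norm_num, PySem.List.pyRange_zero_natCast,
    List.flatMap_map]

theorem loop_eq (m : Int) (a : List Int) (exp : Int) (hexp : 0 < exp) :
    pvLoopA m a exp hexp = pvLoopB m a exp hexp := by
  have key : ∀ (N : Nat) (a : List Int) (exp : Int) (hexp : 0 < exp),
      (PySem.Int.floordiv m exp).toNat ≤ N → pvLoopA m a exp hexp = pvLoopB m a exp hexp := by
    intro N
    induction N with
    | zero =>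
      intro a exp hexp hN
      rw [pvLoopA, pvLoopB]
      have h : ¬ 0 < PySem.Int.floordiv m exp := by omega
      simp [h]
    | succ N ih =>
      intro a exp hexp hN
      rw [pvLoopA, pvLoopB]
      by_cases h : 0 < PySem.Int.floordiv m exp
      · simp only [dif_pos h]
        rw [pass_steps_eq, pass_array_eq a exp hexp,
          ih (pvRebuildB a exp) (exp * 10) (by positivity)
            (by have := pvMeasure_lt m exp hexp h; omega)]
      · simp [h]
  exact key (PySem.Int.floordiv m exp).toNat a exp hexp le_rfl

-- ===== VERDICT (by name: the statement is the Claim_ definition above) =====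
theorem radix_sort_steps_spec : Claim_equal_radix_sort_steps := by
  intro arr _
  unfold Spec_radix_sort_steps radix_sort_steps radix_sort_steps_alt
  by_cases h : arr.isEmpty
  · simp [h]
  · simp only [h]
    cases PySem.List.max? arr (fun x => x) with
    | none => rfl
    | some m => simp only [loop_eq]
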